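-- pv_equiv track=rewrite | github.com/ruinanzhang/Leetcode_Solution | Ebay OA.py | consName
-- ===== SOURCE A (Python) =====
-- import collections
--
-- def consName(s, t):
--     dict_s = collections.Counter(s)
--     dict_t = collections.Counter(t)
--     # First check if dict_s and dict_t have same keys
--     # Second remove same key value paris from s and t dicts
--     if dict_s.keys() != dict_t.keys() or len(s) != len(t):
--         return False
--     for key in dict_s.keys():
--         if dict_s[key] != dict_t[key]:
--             for key_to_swap, val_to_swap in dict_s.items():
--                 if val_to_swap == dict_t[key]:
--                     dict_s[key], dict_s[key_to_swap] = dict_s[key_to_swap], dict_s[key]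
--                     break
--             if dict_s[key] != dict_t[key]:
--                 return False
--         dict_s[key] = 0
--     return True
-- ===== SOURCE B (Python) =====
-- import collections
--
-- def consName(s, t):
--     cs = collections.Counter(s)
--     ct = collections.Counter(t)
--     if cs.keys() != ct.keys() or len(s) != len(t):
--         return False
--     return sorted(cs.values()) == sorted(ct.values())
-- ===== Notes on version B (the rewrite author's own statement) =====
-- stated objective: simpler
-- what changed: Keeps the keys/length guard but replaces the O(k^2) greedy in-place swap loop over the counter with a direct comparison of the two sorted count-value lists.
import Mathlib
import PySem

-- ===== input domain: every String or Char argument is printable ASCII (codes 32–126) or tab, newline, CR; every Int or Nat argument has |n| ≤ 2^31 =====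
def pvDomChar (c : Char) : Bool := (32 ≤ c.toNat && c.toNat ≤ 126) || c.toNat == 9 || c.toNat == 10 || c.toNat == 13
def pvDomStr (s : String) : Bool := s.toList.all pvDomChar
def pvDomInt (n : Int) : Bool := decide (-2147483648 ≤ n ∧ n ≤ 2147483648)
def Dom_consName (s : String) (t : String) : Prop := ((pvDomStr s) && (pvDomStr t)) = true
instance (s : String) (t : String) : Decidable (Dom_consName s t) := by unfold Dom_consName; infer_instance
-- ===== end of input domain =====

-- B keeps A's keys/length guard but replaces the greedy in-place swap loop with a comparison of the two sorted count-value lists (simpler).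

-- ===== PORT A =====
-- the loop 'for key in dict_s.keys(): …' with early 'return False'; dict_s mutates but its key set never changes
def consNameLoop (dt : PySem.Dict Char Int) : List Char → PySem.Dict Char Int → Bool
  | [], _ => true
  | key :: ks, d =>
    if d.getD key 0 != dt.getD key 0 then
      let d1 := match d.items.find? (fun p => p.2 == dt.getD key 0) with
        | some (k2, v2) => (d.insert key v2).insert k2 (d.getD key 0)
        | none => d
      if d1.getD key 0 != dt.getD key 0 then false
      else consNameLoop dt ks (d1.insert key 0)
    else consNameLoop dt ks (d.insert key 0)

def consName (s : String) (t : String) : Bool :=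
  let dict_s := PySem.Dict.counter s.toList
  let dict_t := PySem.Dict.counter t.toList
  if !(PySem.Set.equal dict_s.keys dict_t.keys) || (PySem.Str.len s != PySem.Str.len t) then
    false
  else
    consNameLoop dict_t dict_s.keys dict_s

-- ===== PORT B =====
def consName_alt (s : String) (t : String) : Bool :=
  let cs := PySem.Dict.counter s.toList
  let ct := PySem.Dict.counter t.toList
  if !(PySem.Set.equal cs.keys ct.keys) || (PySem.Str.len s != PySem.Str.len t) then
    false
  else
    PySem.List.sorted cs.values (fun x => x) false == PySem.List.sorted ct.values (fun x => x) false

-- ===== PRECONDITION & SPEC =====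
def Spec_consName (s : String) (t : String) (out : Bool) : Prop := out = consName_alt s t
instance (s : String) (t : String) (out : Bool) : Decidable (Spec_consName s t out) := by unfold Spec_consName; infer_instance

-- ===== CLAIM (what is proved, stated in full; the proofs are below) =====
def Claim_equal_consName : Prop := ∀ (s : String) (t : String), Dom_consName s t → Spec_consName s t (consName s t)

-- ===== LEMMAS AND PROOFS =====

-- replacing the value at one key k2 of a Nodup key list by b: as a multiset, erase the old value and add b
theorem map_pointwise_update (ks : List Char) (f : Char → Int) (k2 : Char) (b : Int)
    (g : Char → Int) (hg : ∀ k ∈ ks, g k = if k = k2 then b else f k)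
    (hnd : ks.Nodup) (hk2 : k2 ∈ ks) :
    ((ks.map g : List Int) : Multiset Int) = b ::ₘ ((ks.map f : List Int) : Multiset Int).erase (f k2) := by
  induction ks with
  | nil => cases hk2
  | cons a rest ih =>
    rcases List.mem_cons.mp hk2 with h | h
    · subst h
      have hnr := List.nodup_cons.mp hnd
      have hgr : rest.map g = rest.map f := List.map_congr_left (fun k hk => by
        have hka : k ≠ k2 := fun he => hnr.1 (he ▸ hk)
        simp [hg k (List.mem_cons_of_mem _ hk), hka])
      have hgk2 : g k2 = b := by simp [hg k2 List.mem_cons_self]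
      simp [hgk2, hgr]
    · have hak2 : a ≠ k2 := fun he => (List.nodup_cons.mp hnd).1 (he ▸ h)
      have hfk2 : f k2 ∈ (rest.map f : Multiset Int) := by
        simpa using List.mem_map_of_mem h
      have ihr := ih (fun k hk => hg k (List.mem_cons_of_mem _ hk)) (List.nodup_cons.mp hnd).2 h
      calc ((List.map g (a :: rest) : List Int) : Multiset Int)
          = g a ::ₘ (rest.map g : Multiset Int) := by simp
        _ = g a ::ₘ (b ::ₘ ((rest.map f : Multiset Int)).erase (f k2)) := by rw [ihr]
        _ = b ::ₘ (g a ::ₘ ((rest.map f : Multiset Int)).erase (f k2)) := Multiset.cons_swap _ _ _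
        _ = b ::ₘ ((f a ::ₘ (rest.map f : Multiset Int)).erase (f k2)) := by
            by_cases hfa : f a = f k2
            · rw [hg a List.mem_cons_self, if_neg hak2, hfa, Multiset.erase_cons_head,
                Multiset.cons_erase hfk2]
            · rw [Multiset.erase_cons_tail _ hfa, hg a List.mem_cons_self, if_neg hak2]
        _ = b ::ₘ ((List.map f (a :: rest) : List Int) : Multiset Int).erase (f k2) := by simp

-- main invariant: the greedy swap loop succeeds iff the needed counts (dt over ks) are,
-- as a multiset, exactly the remaining counts (d over ks)
theorem consNameLoop_iff (dt : PySem.Dict Char Int) (ks : List Char) (d : PySem.Dict Char Int)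
    (hnd : ks.Nodup) (hkeys : d.keys.Nodup)
    (hsub : ∀ k ∈ ks, k ∈ d.keys)
    (hzero : ∀ k ∈ d.keys, k ∉ ks → d.getD k 0 = 0)
    (hpos : ∀ k ∈ ks, 0 < dt.getD k 0) :
    consNameLoop dt ks d = true ↔
      ((ks.map (fun k => dt.getD k 0) : List Int) : Multiset Int)
        = ((ks.map (fun k => d.getD k 0) : List Int) : Multiset Int) := by
  induction ks generalizing d with
  | nil => simp [consNameLoop]
  | cons key ks ih =>
    have hnr := List.nodup_cons.mp hnd
    have hkeyd : key ∈ d.keys := hsub key List.mem_cons_self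
    by_cases h1 : d.getD key 0 = dt.getD key 0
    · -- counts already agree at key: just zero it out
      have hstep : consNameLoop dt (key :: ks) d = consNameLoop dt ks (d.insert key 0) := by
        simp [consNameLoop, h1]
      rw [hstep, ih (d.insert key 0) hnr.2 (PySem.Dict.nodup_keys_insert _ _ _ hkeys)
        (fun k hk => (PySem.Dict.mem_keys_insert _ _ _ _).mpr (Or.inr (hsub k (List.mem_cons_of_mem _ hk))))
        (fun k hk hnk => by
          by_cases hkk : k = key
          · subst hkk; simp [PySem.Dict.getD_insert_self]
          · rw [PySem.Dict.getD_insert_of_ne d 0 0 hkk]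
            exact hzero k ((PySem.Dict.mem_keys_insert _ _ _ _).mp hk |>.resolve_left hkk)
              (by simp [hkk, hnk]))
        (fun k hk => hpos k (List.mem_cons_of_mem _ hk))]
      have hmap : ks.map (fun k => (d.insert key 0).getD k 0) = ks.map (fun k => d.getD k 0) :=
        List.map_congr_left (fun k hk =>
          PySem.Dict.getD_insert_of_ne d 0 0 (fun he => hnr.1 (he ▸ hk)))
      simp only [List.map_cons, hmap, ← Multiset.cons_coe, h1, Multiset.cons_inj_right]
    · -- mismatch at key: greedy swap
      rcases hf : d.items.find? (fun p => p.2 == dt.getD key 0) with _ | ⟨k2, v2⟩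
      · -- no key holds the needed count: A returns False, and the multisets differ
        have hstep : consNameLoop dt (key :: ks) d = false := by
          simp [consNameLoop, h1, hf]
        rw [hstep]
        simp only [Bool.false_eq_true, false_iff]
        intro heq
        have hmem : (dt.getD key 0 : Int) ∈ ((key :: ks).map (fun k => d.getD k 0)) := by
          have : (dt.getD key 0 : Int) ∈ (((key :: ks).map (fun k => dt.getD k 0) : List Int) : Multiset Int) := by
            simp
          rw [heq] at this
          simpa using this
        rcases List.mem_map.mp hmem with ⟨k, hk, hkv⟩
        have hkd : k ∈ d.keys := hsub k hk
        have hitem : (k, d.getD k 0) ∈ d.items := by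
          rw [PySem.Dict.items_eq_map_keys d hkeys 0]
          exact List.mem_map_of_mem hkd
        have := List.find?_eq_none.mp hf _ hitem
        simp [hkv] at this
      · -- found key_to_swap: swap then zero
        have hv2 : v2 = dt.getD key 0 := by
          have := List.find?_some hf
          simpa using this
        have hmemit : (k2, v2) ∈ d.items := List.mem_of_find?_eq_some hf
        have hk2d : d.getD k2 0 = dt.getD key 0 := hv2 ▸ PySem.Dict.getD_of_mem_items _ hmemit hkeys 0
        have hk2key : k2 ≠ key := fun he => h1 (he ▸ hk2d)
        have hk2cons : k2 ∈ key :: ks := by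
          by_contra hn
          have := hzero k2 (PySem.Dict.mem_keys_of_mem_items _ hmemit) hn
          rw [this] at hk2d
          exact absurd hk2d.symm (by have := hpos key List.mem_cons_self; omega)
        have hk2ks : k2 ∈ ks := (List.mem_cons.mp hk2cons).resolve_left hk2key
        have hd1key : ((d.insert key v2).insert k2 (d.getD key 0)).getD key 0 = dt.getD key 0 := by
          rw [PySem.Dict.getD_insert_of_ne _ _ _ (Ne.symm hk2key), PySem.Dict.getD_insert_self, hv2]
        have hstep : consNameLoop dt (key :: ks) d =
            consNameLoop dt ks (((d.insert key v2).insert k2 (d.getD key 0)).insert key 0) := by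
          simp [consNameLoop, h1, hf, hd1key]
        set d2 := ((d.insert key v2).insert k2 (d.getD key 0)).insert key 0 with hd2
        have hptw : ∀ k ∈ ks, d2.getD k 0 = if k = k2 then (d.getD key 0) else d.getD k 0 := by
          intro k hk
          have hkkey : k ≠ key := fun he => hnr.1 (he ▸ hk)
          rw [hd2, PySem.Dict.getD_insert_of_ne _ 0 0 hkkey]
          by_cases hkk2 : k = k2
          · subst hkk2
            rw [PySem.Dict.getD_insert_self]
            simp
          · rw [PySem.Dict.getD_insert_of_ne _ (d.getD key 0) 0 hkk2,
              PySem.Dict.getD_insert_of_ne _ v2 0 hkkey]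
            simp [hkk2]
        have hmemd2 : ∀ k, k ∈ d2.keys ↔ k = key ∨ k = k2 ∨ k ∈ d.keys := by
          intro k
          rw [hd2]
          simp only [PySem.Dict.mem_keys_insert]
          tauto
        rw [hstep, ih d2 hnr.2
          (by rw [hd2]
              exact PySem.Dict.nodup_keys_insert _ _ _
                (PySem.Dict.nodup_keys_insert _ _ _ (PySem.Dict.nodup_keys_insert _ _ _ hkeys)))
          (fun k hk => (hmemd2 k).mpr (Or.inr (Or.inr (hsub k (List.mem_cons_of_mem _ hk)))))
          (fun k hk hnk => by
            by_cases hkkey : k = key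
            · subst hkkey; rw [hd2, PySem.Dict.getD_insert_self]
            · have hkk2 : k ≠ k2 := fun he => hnk (he ▸ hk2ks)
              rw [hd2, PySem.Dict.getD_insert_of_ne _ 0 0 hkkey,
                PySem.Dict.getD_insert_of_ne _ (d.getD key 0) 0 hkk2,
                PySem.Dict.getD_insert_of_ne _ v2 0 hkkey]
              have hkd : k ∈ d.keys := ((hmemd2 k).mp hk).resolve_left hkkey |>.resolve_left hkk2
              exact hzero k hkd (by simp [hkkey, hnk]))
          (fun k hk => hpos k (List.mem_cons_of_mem _ hk))]
        have hupd : ((ks.map (fun k => d2.getD k 0) : List Int) : Multiset Int)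
            = (d.getD key 0) ::ₘ ((ks.map (fun k => d.getD k 0) : List Int) : Multiset Int).erase (dt.getD key 0) := by
          rw [← hk2d]
          exact map_pointwise_update ks (fun k => d.getD k 0) k2 (d.getD key 0) _ hptw hnr.2 hk2ks
        have htvmem : (dt.getD key 0 : Int) ∈ ((ks.map (fun k => d.getD k 0) : List Int) : Multiset Int) := by
          simp only [Multiset.mem_coe, List.mem_map]
          exact ⟨k2, hk2ks, hk2d⟩
        have hdktv : (d.getD key 0) ≠ dt.getD key 0 := h1
        rw [hupd]
        simp only [List.map_cons, ← Multiset.cons_coe]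
        constructor
        · intro h
          rw [h, Multiset.cons_swap, Multiset.cons_erase htvmem]
        · intro h
          have h2 : ((dt.getD key 0 : Int) ::ₘ ((ks.map (fun k => dt.getD k 0) : List Int) : Multiset Int)).erase (dt.getD key 0)
              = ((d.getD key 0 : Int) ::ₘ ((ks.map (fun k => d.getD k 0) : List Int) : Multiset Int)).erase (dt.getD key 0) := by
            rw [h]
          rw [Multiset.erase_cons_head, Multiset.erase_cons_tail _ hdktv] at h2
          exact h2

theorem consName_eq_alt (s t : String) : consName s t = consName_alt s t := by
  unfold consName consName_alt
  by_cases hg : (!(PySem.Set.equal (PySem.Dict.counter s.toList).keys (PySem.Dict.counter t.toList).keys)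
      || (PySem.Str.len s != PySem.Str.len t)) = true
  · simp only [hg, if_true]
  · simp only [hg, Bool.false_eq_true, if_false]
    have hg' := hg
    simp only [Bool.or_eq_true, Bool.not_eq_true', not_or, Bool.not_eq_true, bne_eq_false_iff_eq] at hg'
    obtain ⟨hkeq, _⟩ := hg'
    have hkeys := (PySem.Set.equal_iff _ _).mp (Bool.not_eq_false _ |>.mp hkeq)
    set cs := PySem.Dict.counter s.toList with hcs
    set ct := PySem.Dict.counter t.toList with hct
    have hndc : cs.keys.Nodup := PySem.Dict.nodup_keys_counter _
    have hndt : ct.keys.Nodup := PySem.Dict.nodup_keys_counter _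
    have hpos : ∀ k ∈ cs.keys, 0 < ct.getD k 0 := by
      intro k hk
      have hk' : k ∈ ct.keys := (hkeys k).mp hk
      rw [hct, PySem.Dict.keys_counter] at hk'
      rw [hct, PySem.Dict.getD_counter]
      have : 0 < t.toList.count k := List.count_pos_iff.mpr ((PySem.Set.mem_ofList _ _).mp hk')
      omega
    have hloop := consNameLoop_iff ct cs.keys cs hndc hndc (fun _ hk => hk)
      (fun k hk hnk => absurd hk hnk) hpos
    have hperm : cs.keys.Perm ct.keys := (List.perm_ext_iff_of_nodup hndc hndt).mpr hkeys
    have hvs : cs.values = cs.keys.map (fun k => cs.getD k 0) := PySem.Dict.values_eq_map_keys cs hndc 0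
    have hvt : ct.values = ct.keys.map (fun k => ct.getD k 0) := PySem.Dict.values_eq_map_keys ct hndt 0
    have hiff : consNameLoop ct cs.keys cs = true ↔
        (PySem.List.sorted cs.values (fun x => x) false == PySem.List.sorted ct.values (fun x => x) false) = true := by
      rw [hloop, beq_iff_eq, PySem.List.sorted_id_eq_sorted_id_iff_perm, hvs, hvt]
      rw [Multiset.coe_eq_coe]
      constructor
      · intro h
        exact h.symm.trans (hperm.map _)
      · intro h
        exact (hperm.map _).trans h.symm
    exact Bool.coe_iff_coe.mp hiff

-- ===== VERDICT (by name: the statement is the Claim_ definition above) =====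
theorem consName_spec : Claim_equal_consName := by
  intro s t _
  unfold Spec_consName
  exact consName_eq_alt s t
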